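-- pv_equiv track=rewrite | github.com/derekmartinnj/CIS-210-Assignment-6 | p41_alphapin_key.py | alphapinEncode
-- ===== SOURCE A (Python) =====
-- vowels = 'aeiou'
--
-- consonants = 'bcdfghjklmnpqrstvwyz'
--
-- def alphapinEncode(pin):
--     '''(int) -> str
--
--     converts pin # to an
--     easier-to-remember string,
--     which is returned
--
--     >>> alphapinEncode(27)
--     'hi'
--     >>> alphapinEncode(43)
--     'lo'
--     >>> alphapinEncode(3464408)
--     'bomeluco'
--     >>> alphapinEncode(3464140)
--     'bomelela'
--     '''
--     tone = ''
--
--     wkpin = pin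
--     while wkpin > 0:
--         #retrieve rightmost 2 digits
--         plain = wkpin % 100
--         wkpin = wkpin // 100
--
--         #get the vowel sound
--         vowel = plain % 5
--         vsound = vowels[vowel]
--
--         #and the consonant sound
--         cons = plain // 5
--         csound = consonants[cons]
--
--         #update tone
--         tone = csound + vsound + tone
--
--     return tone
-- ===== SOURCE B (Python) =====
-- vowels = 'aeiou'
--
-- consonants = 'bcdfghjklmnpqrstvwyz'
--
-- def alphapinEncode(pin):
--     '''(int) -> str: recursive high-digits-first encoding of pin.'''
--     if pin <= 0:
--         return ''
--     plain = pin % 100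
--     return alphapinEncode(pin // 100) + consonants[plain // 5] + vowels[plain % 5]
-- ===== Notes on version B (the rewrite author's own statement) =====
-- stated objective: simpler
-- what changed: Replaced A's while-loop that prepends each two-letter group to an accumulator string with a recursion on the high-order digits that appends the low group after the recursive call; no accumulator or working variable remains.
import Mathlib
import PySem

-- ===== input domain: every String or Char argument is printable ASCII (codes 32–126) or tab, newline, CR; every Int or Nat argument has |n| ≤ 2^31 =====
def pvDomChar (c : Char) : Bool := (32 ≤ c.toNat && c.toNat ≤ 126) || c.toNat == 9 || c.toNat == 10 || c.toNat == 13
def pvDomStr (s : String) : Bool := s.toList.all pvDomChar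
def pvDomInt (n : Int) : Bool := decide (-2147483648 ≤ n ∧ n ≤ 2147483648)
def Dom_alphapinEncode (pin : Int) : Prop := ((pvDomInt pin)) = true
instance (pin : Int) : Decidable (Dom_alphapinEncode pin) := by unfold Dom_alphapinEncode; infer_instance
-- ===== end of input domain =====

-- B replaces A's prepend-to-accumulator while-loop by a direct recursion on the high-order digit pairs
-- that appends the low two-digit group after the recursive call (objective: simpler).

-- ===== PORT A =====
def pvVowels : List Char := ['a', 'e', 'i', 'o', 'u']

def pvConsonants : List Char :=
  ['b','c','d','f','g','h','j','k','l','m','n','p','q','r','s','t','v','w','y','z']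

-- the while-loop of A: state (wkpin, tone); indices are always in range
-- (plain % 5 < 5, plain // 5 < 20), so pyGetD's default is never used.
def alphapinEncodeLoop (wkpin : Int) (tone : List Char) : List Char :=
  if _h : wkpin > 0 then
    let plain := PySem.Int.mod wkpin 100
    let wkpin' := PySem.Int.floordiv wkpin 100
    let vsound := PySem.List.pyGetD pvVowels (PySem.Int.mod plain 5) 'a'
    let csound := PySem.List.pyGetD pvConsonants (PySem.Int.floordiv plain 5) 'b'
    alphapinEncodeLoop wkpin' (csound :: vsound :: tone)
  else tone
termination_by wkpin.toNat
decreasing_by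
  have h100 : PySem.Int.floordiv wkpin 100 = wkpin / 100 :=
    PySem.Int.floordiv_eq_ediv_of_pos (by omega)
  simp only [h100]
  omega

def alphapinEncode (pin : Int) : String := String.ofList (alphapinEncodeLoop pin [])

-- ===== PORT B =====
def alphapinEncodeRec (pin : Int) : List Char :=
  if _h : pin ≤ 0 then []
  else
    let plain := PySem.Int.mod pin 100
    alphapinEncodeRec (PySem.Int.floordiv pin 100) ++
      [PySem.List.pyGetD pvConsonants (PySem.Int.floordiv plain 5) 'b',
       PySem.List.pyGetD pvVowels (PySem.Int.mod plain 5) 'a']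
termination_by pin.toNat
decreasing_by
  have h100 : PySem.Int.floordiv pin 100 = pin / 100 :=
    PySem.Int.floordiv_eq_ediv_of_pos (by omega)
  simp only [h100]
  omega

def alphapinEncode_alt (pin : Int) : String := String.ofList (alphapinEncodeRec pin)

-- ===== PRECONDITION & SPEC =====
def Spec_alphapinEncode (pin : Int) (out : String) : Prop := out = alphapinEncode_alt pin
instance (pin : Int) (out : String) : Decidable (Spec_alphapinEncode pin out) := by unfold Spec_alphapinEncode; infer_instance

-- ===== CLAIM (what is proved, stated in full; the proofs are below) =====
def Claim_equal_alphapinEncode : Prop := ∀ (pin : Int), Dom_alphapinEncode pin → Spec_alphapinEncode pin (alphapinEncode pin)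

-- ===== LEMMAS AND PROOFS =====

theorem alphapinEncodeLoop_eq_rec (wkpin : Int) (tone : List Char) :
    alphapinEncodeLoop wkpin tone = alphapinEncodeRec wkpin ++ tone := by
  rw [alphapinEncodeLoop, alphapinEncodeRec]
  by_cases h : wkpin > 0
  · rw [dif_pos h, dif_neg (by omega)]
    rw [alphapinEncodeLoop_eq_rec]
    simp
  · rw [dif_neg h, dif_pos (by omega)]
    simp
termination_by wkpin.toNat
decreasing_by
  have h100 : PySem.Int.floordiv wkpin 100 = wkpin / 100 :=
    PySem.Int.floordiv_eq_ediv_of_pos (by omega)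
  simp only [h100]
  omega

-- ===== VERDICT (by name: the statement is the Claim_ definition above) =====
theorem alphapinEncode_spec : Claim_equal_alphapinEncode := by
  intro pin _
  unfold Spec_alphapinEncode alphapinEncode alphapinEncode_alt
  rw [alphapinEncodeLoop_eq_rec]
  simp
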